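-- pv_equiv track=rewrite | github.com/james-garner-canonical/operator-libs-linux | lib/charms/operator_libs_linux/v0/apt.py | _iter_deb822_stanzas
-- ===== SOURCE A (Python) =====
-- from typing import Any, Dict, Iterable, Iterator, List, Literal, Mapping, Optional, Tuple, Union
--
-- def _iter_deb822_stanzas(lines: Iterable[str]) -> Iterator[List[Tuple[int, str]]]:
--     """Given lines from a deb822 format file, yield a stanza of lines.
--
--     Args:
--         lines: an iterable of lines from a deb822 sources file
--
--     Yields:
--         lists of numbered lines (a tuple of line number and line) that make up
--         a deb822 stanza, with comments stripped out (but accounted for in line numbering)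
--     """
--     current_paragraph: List[Tuple[int, str]] = []
--     for n, line in enumerate(lines, start=1):  # 1 indexed line numbers
--         if not line.strip():  # blank lines separate paragraphs
--             if current_paragraph:
--                 yield current_paragraph
--                 current_paragraph = []
--             continue
--         content, _delim, _comment = line.partition("#")
--         if content.strip():  # skip (potentially indented) comment line
--             current_paragraph.append((n, content.rstrip()))  # preserve indent
--     if current_paragraph:
--         yield current_paragraph
-- ===== SOURCE B (Python) =====
-- def _split_on_none(tokens):
--     """Split a token list into the runs between None separators, dropping empty runs."""
--     if None not in tokens:
--         return [tokens] if tokens else []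
--     i = tokens.index(None)
--     head = tokens[:i]
--     return ([head] if head else []) + _split_on_none(tokens[i + 1:])
--
--
-- def _iter_deb822_stanzas(lines):
--     """Two staged passes: first tokenize every line (None marks a blank
--     separator line; comment-only lines emit nothing; content lines emit their
--     numbered, comment-stripped text), then recursively split the flat token
--     list on the None separators."""
--     tokens = []
--     for n, line in enumerate(lines, start=1):
--         if not line.strip():
--             tokens.append(None)
--         else:
--             content = line.partition("#")[0]
--             if content.strip():
--                 tokens.append((n, content.rstrip()))
--     yield from _split_on_none(tokens)
-- ===== Notes on version B (the rewrite author's own statement) =====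
-- stated objective: alternative
-- what changed: Replaces A's single stateful flush-on-blank accumulator loop by two staged passes: a tokenizing pass producing a flat list (None for blank separators, nothing for comment-only lines, numbered stripped text otherwise), then a recursive index-and-slice split of that token list on the None separators.
import Mathlib
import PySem

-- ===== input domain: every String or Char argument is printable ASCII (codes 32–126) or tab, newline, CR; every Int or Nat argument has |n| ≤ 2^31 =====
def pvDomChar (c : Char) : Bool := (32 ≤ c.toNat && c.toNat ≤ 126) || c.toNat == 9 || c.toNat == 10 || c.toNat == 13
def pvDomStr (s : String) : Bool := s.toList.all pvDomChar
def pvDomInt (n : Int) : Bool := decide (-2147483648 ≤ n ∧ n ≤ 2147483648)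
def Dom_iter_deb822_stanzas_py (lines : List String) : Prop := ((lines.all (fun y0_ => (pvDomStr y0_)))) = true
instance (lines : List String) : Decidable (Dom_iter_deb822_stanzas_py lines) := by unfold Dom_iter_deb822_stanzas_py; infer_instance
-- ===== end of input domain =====

-- B replaces A's stateful flush-on-blank accumulator loop by two staged passes:
-- tokenize every line into a flat list (None = blank separator), then recursively
-- split that token list on the separators (alternative decomposition, not faster).


-- shared primitives (the same Python built-ins appear in both sources)
-- `not line.strip()` — true iff the line is blank/whitespace-only
def pvBlank (s : String) : Bool := (PySem.Chars.strip s.toList).isEmpty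
-- `line.partition("#")[0]` — hand port, exact for the one-character separator "#":
-- the prefix before the first '#' (the whole string when '#' is absent)
def pvContent (s : String) : List Char := s.toList.takeWhile (fun c => c ≠ '#')

-- ===== PORT A =====
-- the loop of A as structural recursion over the enumerated lines, state = current_paragraph
def pvGoA : List (Int × String) → List (Int × String) → List (List (Int × String))
  | [], cur => if cur.isEmpty then [] else [cur]
  | (n, line) :: rest, cur =>
    if pvBlank line then
      (if cur.isEmpty then [] else [cur]) ++ pvGoA rest []
    else
      let content := pvContent line
      if (PySem.Chars.strip content).isEmpty then
        pvGoA rest cur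
      else
        pvGoA rest (cur ++ [(n, String.ofList (PySem.Chars.rstrip content))])

def iter_deb822_stanzas_py (lines : List String) : List (List (Int × String)) :=
  pvGoA (PySem.List.enumerate lines 1) []

-- ===== PORT B =====
-- B's first pass: the `for n, line in enumerate(lines, 1)` loop appending tokens
def pvTokens (lines : List String) : List (Option (Int × String)) :=
  (PySem.List.enumerate lines 1).foldl
    (fun acc p =>
      if pvBlank p.2 then acc ++ [Option.none]
      else
        let content := pvContent p.2
        if (PySem.Chars.strip content).isEmpty then acc
        else acc ++ [some (p.1, String.ofList (PySem.Chars.rstrip content))]) []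

-- B's `_split_on_none`: `None not in tokens` / `tokens.index(None)` / slices.
-- A Python head contains no None, so it already is a list of pairs; `.filterMap id`
-- is the typing coercion only (exact: it is the identity on a None-free list).
def pvSplitOnNone : List (Option (Int × String)) → List (List (Int × String))
  | toks =>
    match h : PySem.List.index? toks Option.none with
    | Option.none => if toks.isEmpty then [] else [toks.filterMap id]
    | some i =>
      let head := (toks.take i).filterMap id
      (if head.isEmpty then [] else [head]) ++ pvSplitOnNone (toks.drop (i + 1))
termination_by toks => toks.length
decreasing_by
  have hk := PySem.List.getElem_of_index?_eq_some h
  obtain ⟨hk, -⟩ := hk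
  simp only [List.length_drop]
  show toks.length - (i + 1) < toks.length
  omega

def iter_deb822_stanzas_py_alt (lines : List String) : List (List (Int × String)) :=
  pvSplitOnNone (pvTokens lines)

-- ===== PRECONDITION & SPEC =====
def Spec_iter_deb822_stanzas_py (lines : List String) (out : List (List (Int × String))) : Prop := out = iter_deb822_stanzas_py_alt lines
instance (lines : List String) (out : List (List (Int × String))) : Decidable (Spec_iter_deb822_stanzas_py lines out) := by unfold Spec_iter_deb822_stanzas_py; infer_instance

-- ===== CLAIM (what is proved, stated in full; the proofs are below) =====
def Claim_equal_iter_deb822_stanzas_py : Prop := ∀ (lines : List String), Dom_iter_deb822_stanzas_py lines → Spec_iter_deb822_stanzas_py lines (iter_deb822_stanzas_py lines)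

-- ===== LEMMAS AND PROOFS =====

-- the tokens contributed by one enumerated line (proof-side view of pvTokens' loop body)
def pvTok (p : Int × String) : List (Option (Int × String)) :=
  if pvBlank p.2 then [Option.none]
  else if (PySem.Chars.strip (pvContent p.2)).isEmpty then []
  else [some (p.1, String.ofList (PySem.Chars.rstrip (pvContent p.2)))]

lemma pvTokens_eq (lines : List String) :
    pvTokens lines = (PySem.List.enumerate lines 1).flatMap pvTok := by
  unfold pvTokens
  have hf : (fun (acc : List (Option (Int × String))) (p : Int × String) =>
      if pvBlank p.2 then acc ++ [Option.none]
      else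
        let content := pvContent p.2
        if (PySem.Chars.strip content).isEmpty then acc
        else acc ++ [some (p.1, String.ofList (PySem.Chars.rstrip content))]) =
      (fun acc p => acc ++ pvTok p) := by
    funext acc p
    unfold pvTok
    split_ifs <;> simp_all [List.isEmpty_iff]
  rw [hf, PySem.List.foldl_append_eq_flatMap]
  simp

-- the semantics both sides share: emit stanzas from the token stream with a current paragraph
def pvEmit : List (Int × String) → List (Option (Int × String)) → List (List (Int × String))
  | cur, [] => if cur.isEmpty then [] else [cur]
  | cur, Option.none :: ts => (if cur.isEmpty then [] else [cur]) ++ pvEmit [] ts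
  | cur, some x :: ts => pvEmit (cur ++ [x]) ts

-- A's loop computes pvEmit over the token stream
lemma pvGoA_eq_emit (e : List (Int × String)) : ∀ cur, pvGoA e cur = pvEmit cur (e.flatMap pvTok) := by
  induction e with
  | nil => intro cur; simp [pvGoA, pvEmit]
  | cons p rest ih =>
    intro cur
    obtain ⟨n, line⟩ := p
    simp only [List.flatMap_cons]
    by_cases hb : pvBlank line
    · simp only [pvGoA, pvTok, hb, if_true, List.cons_append, List.nil_append, pvEmit]
      rw [ih]
    · by_cases hc : (PySem.Chars.strip (pvContent line)).isEmpty
      · simp only [pvGoA, pvTok, hb, hc, Bool.false_eq_true, if_false, if_true, List.nil_append]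
        rw [ih]
      · simp only [pvGoA, pvTok, hb, hc, Bool.false_eq_true, if_false, List.cons_append,
          List.nil_append, pvEmit]
        rw [ih]

-- consuming a None-free prefix just extends the current paragraph
lemma pvEmit_someRun (h : List (Option (Int × String))) (ts : List (Option (Int × String)))
    (hh : Option.none ∉ h) : ∀ cur, pvEmit cur (h ++ ts) = pvEmit (cur ++ h.filterMap id) ts := by
  induction h with
  | nil => intro cur; simp
  | cons t h ih =>
    intro cur
    cases t with
    | none => exact absurd (by simp) hh
    | some x =>
      simp only [List.cons_append, pvEmit, List.filterMap_cons, id]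
      rw [ih (by simpa using fun hx => hh (by simp [hx]))]
      simp

lemma filterMap_id_isEmpty (h : List (Option (Int × String))) (hh : Option.none ∉ h) :
    (h.filterMap id).isEmpty = h.isEmpty := by
  cases h with
  | nil => simp
  | cons t h =>
    cases t with
    | none => exact absurd (by simp) hh
    | some x => simp

-- B's recursive split computes the same emission (strong induction on the token list length)
lemma pvSplit_eq_emit_aux (n : Nat) : ∀ toks : List (Option (Int × String)), toks.length ≤ n →
    pvSplitOnNone toks = pvEmit [] toks := by
  induction n with
  | zero =>
    intro toks h
    have : toks = [] := List.length_eq_zero_iff.mp (Nat.le_zero.mp h)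
    subst this
    rw [pvSplitOnNone.eq_def]
    simp [pvEmit, PySem.List.index?_eq_idxOf?]
  | succ n ih =>
    intro toks hlen
    rw [pvSplitOnNone.eq_def]
    dsimp only
    split
    next hidx =>
      have hnm : Option.none ∉ toks := (PySem.List.index?_eq_none_iff _ _).mp hidx
      have hrun := pvEmit_someRun toks [] hnm []
      simp only [List.append_nil, List.nil_append] at hrun
      rw [hrun]
      simp only [pvEmit, filterMap_id_isEmpty toks hnm]
    next i hidx =>
      obtain ⟨pre, suf, hsplit, hlenp, hnm⟩ := (PySem.List.index?_eq_some_iff _ _ _).mp hidx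
      have htake : toks.take i = pre := by rw [hsplit, ← hlenp]; simp
      have hdrop : toks.drop (i + 1) = suf := by
        rw [hsplit, ← hlenp]; simp [List.drop_append]
      have hsuf : suf.length ≤ n := by
        have := congrArg List.length hsplit
        simp at this
        omega
      have hemit : pvEmit [] toks =
          (if (pre.filterMap id).isEmpty then [] else [pre.filterMap id]) ++ pvEmit [] suf := by
        rw [hsplit, pvEmit_someRun pre (Option.none :: suf) hnm []]
        simp only [List.nil_append, pvEmit, filterMap_id_isEmpty pre hnm]
      rw [htake, hdrop, hemit, ih suf hsuf]

lemma pvSplit_eq_emit (toks : List (Option (Int × String))) :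
    pvSplitOnNone toks = pvEmit [] toks :=
  pvSplit_eq_emit_aux toks.length toks (Nat.le_refl _)

-- ===== VERDICT (by name: the statement is the Claim_ definition above) =====
theorem iter_deb822_stanzas_py_spec : Claim_equal_iter_deb822_stanzas_py := by
  intro lines _
  unfold Spec_iter_deb822_stanzas_py iter_deb822_stanzas_py iter_deb822_stanzas_py_alt
  rw [pvTokens_eq, pvSplit_eq_emit, pvGoA_eq_emit]
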